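-- pv_equiv track=rewrite | github.com/Zheranbkk/Wuzi-Chess | engine/rules.py | clear_matching_lines
-- ===== SOURCE A (Python) =====
-- def clear_matching_lines(board: list[list[int]], board_size: int) -> bool:
--     directions = [(1, 0), (0, 1), (1, 1), (1, -1)]
--     to_clear: set[tuple[int, int]] = set()
--
--     for y in range(board_size):
--         for x in range(board_size):
--             color = board[y][x]
--             if color not in [1, 2]:
--                 continue
--
--             for dx, dy in directions:
--                 temp = [(x, y)]
--                 for i in range(1, 5):
--                     nx = x + dx * i
--                     ny = y + dy * i
--                     if 0 <= nx < board_size and 0 <= ny < board_size and board[ny][nx] == color: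
--                         temp.append((nx, ny))
--                     else:
--                         break
--                 if len(temp) >= 5:
--                     to_clear.update(temp)
--
--     for x, y in to_clear:
--         board[y][x] = 0
--
--     return len(to_clear) > 0
-- ===== SOURCE B (Python) =====
-- def clear_matching_lines(board: list[list[int]], board_size: int) -> bool:
--     n = board_size
--     to_clear: set[tuple[int, int]] = set()
--     found = False
--     for dx, dy in [(1, 0), (0, 1), (1, 1), (1, -1)]:
--         for y in range(n):
--             for x in range(n):
--                 if 0 <= x - dx < n and 0 <= y - dy < n:
--                     continue  # has a predecessor along (dx, dy): not a line start
--                 line = [(x + dx * i, y + dy * i) for i in range(n)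
--                         if 0 <= x + dx * i < n and 0 <= y + dy * i < n]
--                 run_color, run_len, run_cells = 0, 0, []
--                 for cx, cy in line:
--                     c = board[cy][cx]
--                     if c == run_color and c in (1, 2):
--                         run_len += 1
--                         run_cells.append((cx, cy))
--                     else:
--                         if (run_color in (1, 2)) and run_len >= 5:
--                             to_clear.update(run_cells)
--                             found = True
--                         run_color, run_len, run_cells = c, 1, [(cx, cy)]
--                 if (run_color in (1, 2)) and run_len >= 5:
--                     to_clear.update(run_cells)
--                     found = True
--     for cx, cy in to_clear:
--         board[cy][cx] = 0
--     return found
-- ===== Notes on version B (the rewrite author's own statement) =====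
-- stated objective: alternative
-- what changed: A fans out a capped 5-cell walk in each of 4 directions from every stone and collects hit windows into a set; B instead scans each maximal board line (rows, columns, both diagonal families, found via cells with no predecessor in the direction) once with a running color/run-length state, closing runs of length >= 5.
import Mathlib
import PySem

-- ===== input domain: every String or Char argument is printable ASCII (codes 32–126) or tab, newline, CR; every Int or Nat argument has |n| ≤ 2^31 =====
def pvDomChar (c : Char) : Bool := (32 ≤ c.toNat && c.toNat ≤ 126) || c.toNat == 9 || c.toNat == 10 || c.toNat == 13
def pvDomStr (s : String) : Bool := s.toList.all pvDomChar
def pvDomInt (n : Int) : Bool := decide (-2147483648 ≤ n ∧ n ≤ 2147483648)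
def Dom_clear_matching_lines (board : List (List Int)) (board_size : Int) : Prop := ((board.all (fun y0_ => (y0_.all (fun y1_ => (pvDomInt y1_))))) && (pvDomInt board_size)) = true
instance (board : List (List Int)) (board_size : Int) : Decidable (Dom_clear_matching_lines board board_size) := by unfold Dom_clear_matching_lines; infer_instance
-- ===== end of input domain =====

-- B replaces A's per-cell fixed-5-window fan-out (every cell spawns 4 capped walks) by one
-- run-length scan along each maximal board line (line starts = cells with no predecessor in the
-- direction); equivalence is about the RETURN value (both Pythons also zero the same cells in place).

-- board[y][x] (in range under Pre_, so the default is never returned)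
def pvCell (board : List (List Int)) (y x : Int) : Int :=
  PySem.List.pyGetD (PySem.List.pyGetD board y []) x 0

-- ===== PORT A =====
def pvDirsA : List (Int × Int) := [(1, 0), (0, 1), (1, 1), (1, -1)]

-- temp-building loop: for i in range(1,5): extend or break (break = stop the recursion)
def pvTempGo (board : List (List Int)) (n x y color dx dy : Int) :
    List Int → List (Int × Int) → List (Int × Int)
  | [], temp => temp
  | i :: rest, temp =>
      if 0 ≤ x + dx * i ∧ x + dx * i < n ∧ 0 ≤ y + dy * i ∧ y + dy * i < n ∧
          pvCell board (y + dy * i) (x + dx * i) = color then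
        pvTempGo board n x y color dx dy rest (temp ++ [(x + dx * i, y + dy * i)])
      else temp

def pvTempA (board : List (List Int)) (n x y color dx dy : Int) : List (Int × Int) :=
  pvTempGo board n x y color dx dy (PySem.List.pyRange 1 5) [(x, y)]

def pvStepDirA (board : List (List Int)) (n x y color : Int)
    (acc : PySem.Set (Int × Int)) (d : Int × Int) : PySem.Set (Int × Int) :=
  if 5 ≤ (pvTempA board n x y color d.1 d.2).length then
    (pvTempA board n x y color d.1 d.2).foldl PySem.Set.add acc
  else acc

def pvStepXA (board : List (List Int)) (n y : Int)
    (acc : PySem.Set (Int × Int)) (x : Int) : PySem.Set (Int × Int) :=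
  if pvCell board y x = 1 ∨ pvCell board y x = 2 then
    pvDirsA.foldl (pvStepDirA board n x y (pvCell board y x)) acc
  else acc

def clear_matching_lines (board : List (List Int)) (board_size : Int) : Bool :=
  decide (0 < ((PySem.List.pyRange 0 board_size).foldl
    (fun acc y => (PySem.List.pyRange 0 board_size).foldl (pvStepXA board board_size y) acc)
    ([] : PySem.Set (Int × Int))).length)

-- ===== PORT B =====
-- the maximal line through a start cell: [(x+dx*i, y+dy*i) for i in range(n) if in bounds]
def pvLineB (n x y dx dy : Int) : List (Int × Int) :=
  ((PySem.List.pyRange 0 n).filter (fun i =>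
      decide (0 ≤ x + dx * i ∧ x + dx * i < n ∧ 0 ≤ y + dy * i ∧ y + dy * i < n))).map
    (fun i => (x + dx * i, y + dy * i))

structure PvStB where
  rc : Int                        -- run_color
  rl : Int                        -- run_len
  cells : List (Int × Int)        -- run_cells
  tc : PySem.Set (Int × Int)      -- to_clear
  fd : Bool                       -- found

def pvCellStepB (board : List (List Int)) (s : PvStB) (p : Int × Int) : PvStB :=
  let c := pvCell board p.2 p.1
  if c = s.rc ∧ (c = 1 ∨ c = 2) then
    { s with rl := s.rl + 1, cells := s.cells ++ [p] }
  else if (s.rc = 1 ∨ s.rc = 2) ∧ 5 ≤ s.rl then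
    { rc := c, rl := 1, cells := [p], tc := s.cells.foldl PySem.Set.add s.tc, fd := true }
  else
    { rc := c, rl := 1, cells := [p], tc := s.tc, fd := s.fd }

def pvScanB (board : List (List Int)) (st : PySem.Set (Int × Int) × Bool)
    (line : List (Int × Int)) : PySem.Set (Int × Int) × Bool :=
  let s := line.foldl (pvCellStepB board) ⟨0, 0, [], st.1, st.2⟩
  if (s.rc = 1 ∨ s.rc = 2) ∧ 5 ≤ s.rl then (s.cells.foldl PySem.Set.add s.tc, true)
  else (s.tc, s.fd)

def pvStepXB (board : List (List Int)) (n dx dy y : Int)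
    (st : PySem.Set (Int × Int) × Bool) (x : Int) : PySem.Set (Int × Int) × Bool :=
  if 0 ≤ x - dx ∧ x - dx < n ∧ 0 ≤ y - dy ∧ y - dy < n then st
  else pvScanB board st (pvLineB n x y dx dy)

def clear_matching_lines_alt (board : List (List Int)) (board_size : Int) : Bool :=
  (([(1, 0), (0, 1), (1, 1), (1, -1)] : List (Int × Int)).foldl
    (fun st d =>
      (PySem.List.pyRange 0 board_size).foldl
        (fun st2 y =>
          (PySem.List.pyRange 0 board_size).foldl
            (pvStepXB board board_size d.1 d.2 y) st2)
        st)
    (([] : PySem.Set (Int × Int)), false)).2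

-- ===== PRECONDITION & SPEC =====
-- Pre_ = exactly the inputs on which Python A returns (A indexes board[y][x] for all 0 ≤ x,y < board_size,
-- so it raises IndexError unless the first board_size rows exist and each has ≥ board_size entries).
-- The Lean ports are total (out-of-range reads go through pyGetD), so the equivalence proof below
-- happens to hold without Pre_; Pre_ is stated solely to exclude the inputs where Python A raises.
def Pre_clear_matching_lines (board : List (List Int)) (board_size : Int) : Prop :=
  board_size ≤ (board.length : Int) ∧
    ∀ row ∈ board.take board_size.toNat, board_size ≤ (row.length : Int)
instance (board : List (List Int)) (board_size : Int) : Decidable (Pre_clear_matching_lines board board_size) := by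
  unfold Pre_clear_matching_lines; infer_instance

def pvWitness_clear_matching_lines : List (List Int) × Int := ([[1, 0], [2, 1]], 2)

def Spec_clear_matching_lines (board : List (List Int)) (board_size : Int) (out : Bool) : Prop :=
  out = clear_matching_lines_alt board board_size
instance (board : List (List Int)) (board_size : Int) (out : Bool) : Decidable (Spec_clear_matching_lines board board_size out) := by
  unfold Spec_clear_matching_lines; infer_instance

-- ===== CLAIM (what is proved, stated in full; the proofs are below) =====
def Claim_equal_clear_matching_lines : Prop := ∀ (board : List (List Int)) (board_size : Int), Dom_clear_matching_lines board board_size → Pre_clear_matching_lines board board_size → Spec_clear_matching_lines board board_size (clear_matching_lines board board_size)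


-- ===== LEMMAS AND PROOFS =====

-- ---- spec-side predicates ----

-- a five-in-a-row window of color-{1,2} cells starting at (x,y) in direction (dx,dy)
def pvWin (board : List (List Int)) (n dx dy x y : Int) : Prop :=
  (pvCell board y x = 1 ∨ pvCell board y x = 2) ∧
  ∀ i : Int, 0 ≤ i → i ≤ 4 →
    0 ≤ x + dx * i ∧ x + dx * i < n ∧ 0 ≤ y + dy * i ∧ y + dy * i < n ∧
    pvCell board (y + dy * i) (x + dx * i) = pvCell board y x

def pvP (board : List (List Int)) (n : Int) : Prop :=
  ∃ d ∈ pvDirsA, ∃ x y : Int, pvWin board n d.1 d.2 x y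

-- ---- PySem.Set length facts ----

lemma pvAdd_len_pos (s : PySem.Set (Int × Int)) (x : Int × Int) : 0 < (s.add x).length := by
  unfold PySem.Set.add
  split_ifs with h
  · rcases s with _ | ⟨a, s⟩ <;> simp_all
  · simp

lemma pvFoldAdd_pos (t : List (Int × Int)) (s : PySem.Set (Int × Int)) :
    0 < (t.foldl PySem.Set.add s).length ↔ 0 < s.length ∨ 0 < t.length := by
  induction t generalizing s with
  | nil => simp
  | cons a t ih =>
    simp only [List.foldl_cons, ih]
    constructor
    · intro _; simp
    · intro _; left; exact pvAdd_len_pos s a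

-- ---- generic fold shapes ----

lemma pvFoldPos {β : Type} (f : PySem.Set (Int × Int) → β → PySem.Set (Int × Int)) (q : β → Prop)
    (h : ∀ s e, (0 < (f s e).length ↔ 0 < s.length ∨ q e)) :
    ∀ (l : List β) (s), 0 < (l.foldl f s).length ↔ 0 < s.length ∨ ∃ e ∈ l, q e := by
  intro l
  induction l with
  | nil => simp
  | cons a l ih =>
    intro s
    simp only [List.foldl_cons, ih, h s a, List.mem_cons]
    constructor
    · rintro ((hs | ha) | ⟨e, he, hq⟩)
      · exact Or.inl hs
      · exact Or.inr ⟨a, Or.inl rfl, ha⟩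
      · exact Or.inr ⟨e, Or.inr he, hq⟩
    · rintro (hs | ⟨e, (rfl | he), hq⟩)
      · exact Or.inl (Or.inl hs)
      · exact Or.inl (Or.inr hq)
      · exact Or.inr ⟨e, he, hq⟩

lemma pvFoldFd {β : Type} (f : PySem.Set (Int × Int) × Bool → β → PySem.Set (Int × Int) × Bool)
    (q : β → Bool) (h : ∀ st e, (f st e).2 = (st.2 || q e)) :
    ∀ (l : List β) (st), (l.foldl f st).2 = (st.2 || l.any q) := by
  intro l
  induction l with
  | nil => simp
  | cons a l ih =>
    intro st
    simp only [List.foldl_cons, ih, h st a, List.any_cons, Bool.or_assoc]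

-- ---- A side: from the port to windows ----

def pvHitA (board : List (List Int)) (n x y : Int) : Prop :=
  (pvCell board y x = 1 ∨ pvCell board y x = 2) ∧
  ∃ d ∈ pvDirsA, 5 ≤ (pvTempA board n x y (pvCell board y x) d.1 d.2).length

lemma pvTempA_len_iff (board : List (List Int)) (n x y color dx dy : Int) :
    5 ≤ (pvTempA board n x y color dx dy).length ↔
      (∀ i : Int, 1 ≤ i → i ≤ 4 →
        0 ≤ x + dx * i ∧ x + dx * i < n ∧ 0 ≤ y + dy * i ∧ y + dy * i < n ∧
        pvCell board (y + dy * i) (x + dx * i) = color) := by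
  have hr : PySem.List.pyRange 1 5 = [1, 2, 3, 4] := by decide
  rw [pvTempA, hr]
  simp only [pvTempGo]
  constructor
  · intro h i h1 h4
    have hi : i = 1 ∨ i = 2 ∨ i = 3 ∨ i = 4 := by omega
    split_ifs at h
    all_goals simp_all
    all_goals rcases hi with rfl | rfl | rfl | rfl <;> simp_all
  · intro h
    have h1 := h 1 (by norm_num) (by norm_num)
    have h2 := h 2 (by norm_num) (by norm_num)
    have h3 := h 3 (by norm_num) (by norm_num)
    have h4 := h 4 (by norm_num) (by norm_num)
    split_ifs
    all_goals simp_all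

lemma pvStepDirA_pos (board : List (List Int)) (n x y color : Int)
    (s : PySem.Set (Int × Int)) (d : Int × Int) :
    0 < (pvStepDirA board n x y color s d).length ↔
      0 < s.length ∨ 5 ≤ (pvTempA board n x y color d.1 d.2).length := by
  unfold pvStepDirA
  split_ifs with h5
  · rw [pvFoldAdd_pos]
    constructor
    · intro _; exact Or.inr h5
    · intro _; right; omega
  · tauto

lemma pvStepXA_pos (board : List (List Int)) (n y : Int)
    (s : PySem.Set (Int × Int)) (x : Int) :
    0 < (pvStepXA board n y s x).length ↔ 0 < s.length ∨ pvHitA board n x y := by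
  unfold pvStepXA pvHitA
  split_ifs with hc
  · rw [pvFoldPos _ (fun d => 5 ≤ (pvTempA board n x y (pvCell board y x) d.1 d.2).length)
      (fun s d => pvStepDirA_pos board n x y (pvCell board y x) s d)]
    tauto
  · tauto

lemma pvA_iff (board : List (List Int)) (n : Int) :
    clear_matching_lines board n = true ↔
      ∃ y ∈ PySem.List.pyRange 0 n, ∃ x ∈ PySem.List.pyRange 0 n, pvHitA board n x y := by
  unfold clear_matching_lines
  rw [decide_eq_true_iff]
  rw [pvFoldPos _ (fun y => ∃ x ∈ PySem.List.pyRange 0 n, pvHitA board n x y)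
      (fun s y => pvFoldPos _ (fun x => pvHitA board n x y) (fun s x => pvStepXA_pos board n y s x)
        (PySem.List.pyRange 0 n) s)]
  simp

lemma pvA_iff_P (board : List (List Int)) (n : Int) :
    clear_matching_lines board n = true ↔ pvP board n := by
  rw [pvA_iff]
  unfold pvP pvHitA
  constructor
  · rintro ⟨y, hy, x, hx, hc, d, hd, hlen⟩
    rw [PySem.List.mem_pyRange_one] at hy hx
    rw [pvTempA_len_iff] at hlen
    refine ⟨d, hd, x, y, hc, ?_⟩
    intro i h0 h4
    rcases lt_or_ge i 1 with hi | hi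
    · have : i = 0 := by omega
      subst this
      simp only [mul_zero, add_zero]
      exact ⟨hx.1, hx.2, hy.1, hy.2, by trivial⟩
    · exact hlen i hi h4
  · rintro ⟨d, hd, x, y, hc, hall⟩
    have h0 := hall 0 (by norm_num) (by norm_num)
    simp only [mul_zero, add_zero] at h0
    refine ⟨y, ?_, x, ?_, hc, d, hd, ?_⟩
    · rw [PySem.List.mem_pyRange_one]; exact ⟨h0.2.2.1, h0.2.2.2.1⟩
    · rw [PySem.List.mem_pyRange_one]; exact ⟨h0.1, h0.2.1⟩
    · rw [pvTempA_len_iff]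
      intro i h1 h4
      exact hall i (by omega) h4

-- ---- B side: the run-length scan as a recursive spec function ----

def pvColors (board : List (List Int)) (line : List (Int × Int)) : List Int :=
  line.map fun p => pvCell board p.2 p.1

-- found-contribution of scanning vs from run state (rc, rl)
def pvG (rc rl : Int) : List Int → Bool
  | [] => decide ((rc = 1 ∨ rc = 2) ∧ 5 ≤ rl)
  | c :: rest =>
      if c = rc ∧ (c = 1 ∨ c = 2) then pvG rc (rl + 1) rest
      else decide ((rc = 1 ∨ rc = 2) ∧ 5 ≤ rl) || pvG c 1 rest

def pvClose (s : PvStB) : Bool := if (s.rc = 1 ∨ s.rc = 2) ∧ 5 ≤ s.rl then true else s.fd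

lemma pvScan_fold (board : List (List Int)) :
    ∀ (line : List (Int × Int)) (s : PvStB),
      pvClose (line.foldl (pvCellStepB board) s) = (s.fd || pvG s.rc s.rl (pvColors board line)) := by
  intro line
  induction line with
  | nil => intro s; simp [pvColors, pvG, pvClose, Bool.or_comm]
  | cons p rest ih =>
    intro s
    simp only [List.foldl_cons, pvColors, List.map_cons]
    rw [show (pvColors board rest) = rest.map (fun p => pvCell board p.2 p.1) from rfl] at ih
    simp only [pvG]
    by_cases hm : pvCell board p.2 p.1 = s.rc ∧ (pvCell board p.2 p.1 = 1 ∨ pvCell board p.2 p.1 = 2)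
    · rw [if_pos hm, show pvCellStepB board s p = { s with rl := s.rl + 1, cells := s.cells ++ [p] }
        from by unfold pvCellStepB; rw [if_pos hm]]
      exact ih _
    · rw [if_neg hm]
      by_cases hcl : (s.rc = 1 ∨ s.rc = 2) ∧ 5 ≤ s.rl
      · rw [show pvCellStepB board s p =
            { rc := pvCell board p.2 p.1, rl := 1, cells := [p],
              tc := s.cells.foldl PySem.Set.add s.tc, fd := true }
          from by unfold pvCellStepB; rw [if_neg hm, if_pos hcl]]
        rw [ih]
        simp [hcl]
      · rw [show pvCellStepB board s p =
            { rc := pvCell board p.2 p.1, rl := 1, cells := [p], tc := s.tc, fd := s.fd }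
          from by unfold pvCellStepB; rw [if_neg hm, if_neg hcl]]
        rw [ih]
        simp [hcl]

lemma pvScanB_snd (board : List (List Int)) (st : PySem.Set (Int × Int) × Bool)
    (line : List (Int × Int)) :
    (pvScanB board st line).2 = (st.2 || pvG 0 0 (pvColors board line)) := by
  have h := pvScan_fold board line ⟨0, 0, [], st.1, st.2⟩
  unfold pvClose at h
  unfold pvScanB
  set s' := line.foldl (pvCellStepB board) ⟨0, 0, [], st.1, st.2⟩ with hs
  by_cases hc : (s'.rc = 1 ∨ s'.rc = 2) ∧ 5 ≤ s'.rl
  · rw [if_pos hc] at h ⊢; exact h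
  · rw [if_neg hc] at h ⊢; exact h

def pvHitB (board : List (List Int)) (n dx dy y x : Int) : Bool :=
  if 0 ≤ x - dx ∧ x - dx < n ∧ 0 ≤ y - dy ∧ y - dy < n then false
  else pvG 0 0 (pvColors board (pvLineB n x y dx dy))

lemma pvStepXB_snd (board : List (List Int)) (n dx dy y : Int)
    (st : PySem.Set (Int × Int) × Bool) (x : Int) :
    (pvStepXB board n dx dy y st x).2 = (st.2 || pvHitB board n dx dy y x) := by
  unfold pvStepXB pvHitB
  split_ifs
  · simp
  · exact pvScanB_snd board st _

lemma pvB_iff (board : List (List Int)) (n : Int) :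
    clear_matching_lines_alt board n = true ↔
      ∃ d ∈ pvDirsA, ∃ y ∈ PySem.List.pyRange 0 n, ∃ x ∈ PySem.List.pyRange 0 n,
        pvHitB board n d.1 d.2 y x = true := by
  unfold clear_matching_lines_alt
  rw [pvFoldFd _ (fun d => (PySem.List.pyRange 0 n).any fun y =>
        (PySem.List.pyRange 0 n).any fun x => pvHitB board n d.1 d.2 y x)
      (fun st d => by
        rw [pvFoldFd _ (fun y => (PySem.List.pyRange 0 n).any fun x => pvHitB board n d.1 d.2 y x)
            (fun st2 y => pvFoldFd _ (fun x => pvHitB board n d.1 d.2 y x)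
              (fun st3 x => pvStepXB_snd board n d.1 d.2 y st3 x) (PySem.List.pyRange 0 n) st2)])]
  show ((false || _) = true) ↔ _
  rw [Bool.false_or, List.any_eq_true]
  simp only [List.any_eq_true]
  unfold pvDirsA
  tauto

-- ---- windows as replicate-prefixes ----

-- "some 5-in-a-row of a {1,2} color occurs in vs"
def pvQ (vs : List Int) : Prop :=
  ∃ c j, (c = 1 ∨ c = 2) ∧ List.replicate 5 c <+: vs.drop j

lemma pvPrefRepl {α : Type} (m : Nat) (d : α) (xs : List α) :
    List.replicate m d <+: xs ↔ m ≤ xs.length ∧ ∀ i < m, xs[i]? = some d := by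
  constructor
  · intro h
    have hl := h.length_le
    rw [List.length_replicate] at hl
    refine ⟨hl, fun i hi => ?_⟩
    obtain ⟨t, ht⟩ := h
    rw [← ht, List.getElem?_append_left (by simp only [List.length_replicate]; omega),
      List.getElem?_replicate, if_pos hi]
  · rintro ⟨hl, h⟩
    rw [List.prefix_iff_eq_take, List.length_replicate]
    apply List.ext_getElem?
    intro i
    rcases lt_or_ge i m with hi | hi
    · rw [List.getElem?_take_of_lt hi, h i hi, List.getElem?_replicate, if_pos hi]
    · rw [List.getElem?_replicate, if_neg (by omega), List.getElem?_eq_none]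
      rw [List.length_take]
      omega

lemma pvQ_replicate (t : Nat) (r : Int) :
    pvQ (List.replicate t r) ↔ (r = 1 ∨ r = 2) ∧ 5 ≤ t := by
  constructor
  · rintro ⟨c, j, hc, hp⟩
    rw [List.drop_replicate, pvPrefRepl] at hp
    have hl := hp.1
    rw [List.length_replicate] at hl
    have h0 := hp.2 0 (by norm_num)
    rw [List.getElem?_replicate, if_pos (by omega)] at h0
    have : c = r := by injection h0 with h; omega
    subst this
    exact ⟨hc, by omega⟩
  · rintro ⟨hr, ht⟩
    refine ⟨r, 0, hr, ?_⟩
    rw [List.drop_zero, pvPrefRepl, List.length_replicate]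
    refine ⟨ht, fun i hi => ?_⟩
    rw [List.getElem?_replicate, if_pos (by omega)]

lemma pvQ_split (k : Nat) (r c : Int) (rest : List Int)
    (h : ¬(c = r ∧ (c = 1 ∨ c = 2))) :
    pvQ (List.replicate k r ++ c :: rest) ↔
      ((r = 1 ∨ r = 2) ∧ 5 ≤ k) ∨ pvQ (c :: rest) := by
  constructor
  · rintro ⟨c0, j, hc0, hp⟩
    rcases le_or_gt k j with hkj | hkj
    · -- the window lies inside c :: rest
      right
      refine ⟨c0, j - k, hc0, ?_⟩
      rw [List.drop_append, List.drop_replicate, List.length_replicate] at hp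
      rw [show k - j = 0 from by omega, List.replicate_zero, List.nil_append] at hp
      exact hp
    · rw [List.drop_append, List.drop_replicate, List.length_replicate,
        show j - k = 0 from by omega, List.drop_zero] at hp
      rw [pvPrefRepl] at hp
      have h0 := hp.2 0 (by norm_num)
      rw [List.getElem?_append_left (by simp only [List.length_replicate]; omega), List.getElem?_replicate,
        if_pos (by omega)] at h0
      have hc0r : c0 = r := by injection h0 with h'; omega
      rcases le_or_gt 5 (k - j) with h5 | h5
      · left; exact ⟨hc0r ▸ hc0, by omega⟩
      · -- the window would straddle the boundary: position k - j holds c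
        exfalso
        have hkk := hp.2 (k - j) (by omega)
        rw [List.getElem?_append_right (by simp only [List.length_replicate]; omega)] at hkk
        simp only [List.length_replicate, Nat.sub_self, List.getElem?_cons_zero] at hkk
        have : c0 = c := by injection hkk with h'; omega
        exact h ⟨by omega, by omega⟩
  · rintro (⟨hr, hk⟩ | ⟨c0, j, hc0, hp⟩)
    · refine ⟨r, 0, hr, ?_⟩
      rw [List.drop_zero, pvPrefRepl]
      constructor
      · simp only [List.length_append, List.length_replicate, List.length_cons]; omega
      · intro i hi
        rw [List.getElem?_append_left (by simp only [List.length_replicate]; omega),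
          List.getElem?_replicate, if_pos (by omega)]
    · refine ⟨c0, k + j, hc0, ?_⟩
      rw [List.drop_append, List.drop_replicate, show k - (k + j) = 0 from by omega,
        List.replicate_zero, List.nil_append, List.length_replicate, show k + j - k = j from by omega]
      exact hp

lemma pvG_iff : ∀ (vs : List Int) (rc rl : Int), 0 ≤ rl →
    (pvG rc rl vs = true ↔ pvQ (List.replicate rl.toNat rc ++ vs)) := by
  intro vs
  induction vs with
  | nil =>
    intro rc rl h0
    rw [List.append_nil]
    simp only [pvG, decide_eq_true_eq]
    rw [pvQ_replicate]
    omega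
  | cons c rest ih =>
    intro rc rl h0
    simp only [pvG]
    by_cases hm : c = rc ∧ (c = 1 ∨ c = 2)
    · rw [if_pos hm, ih rc (rl + 1) (by omega)]
      rcases hm with ⟨rfl, _⟩
      rw [show (rl + 1).toNat = rl.toNat + 1 from by omega, List.replicate_succ',
        List.append_assoc, List.singleton_append]
    · rw [if_neg hm]
      rw [pvQ_split rl.toNat rc c rest (by tauto)]
      have hrest := ih c 1 (by norm_num)
      simp only [Int.toNat_one, List.replicate_one, List.singleton_append] at hrest
      simp only [Bool.or_eq_true, decide_eq_true_eq, hrest]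
      constructor
      · rintro (⟨h1, h2⟩ | h2)
        · exact Or.inl ⟨h1, by omega⟩
        · exact Or.inr h2
      · rintro (⟨h1, h2⟩ | h2)
        · exact Or.inl ⟨h1, by omega⟩
        · exact Or.inr h2

lemma pvQ_map_range (v : Nat → Int) (K : Nat) :
    pvQ (List.map v (List.range K)) ↔
      ∃ j, j + 5 ≤ K ∧ (v j = 1 ∨ v j = 2) ∧ ∀ i < 5, v (j + i) = v j := by
  have hget : ∀ t : Nat, t < K → (List.map v (List.range K))[t]? = some (v t) := by
    intro t ht
    rw [List.getElem?_map, List.getElem?_range ht]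
    rfl
  constructor
  · rintro ⟨c, j, hc, hp⟩
    rw [pvPrefRepl] at hp
    have hl := hp.1
    simp only [List.length_drop, List.length_map, List.length_range] at hl
    have hj5 : j + 5 ≤ K := by omega
    have hv : ∀ i < 5, v (j + i) = c := by
      intro i hi
      have := hp.2 i hi
      rw [List.getElem?_drop, hget (j + i) (by omega)] at this
      exact Option.some.inj this
    have hvj : v j = c := by have := hv 0 (by norm_num); simpa using this
    exact ⟨j, hj5, by rw [hvj]; exact hc, fun i hi => by rw [hv i hi, hvj]⟩
  · rintro ⟨j, hj5, hc, hv⟩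
    refine ⟨v j, j, hc, ?_⟩
    rw [pvPrefRepl]
    constructor
    · simp only [List.length_drop, List.length_map, List.length_range]; omega
    · intro i hi
      rw [List.getElem?_drop, hget (j + i) (by omega), hv i hi]

-- ---- the filtered range is an initial segment ----

lemma pvFilterRange (q : Nat → Bool) :
    ∀ m : Nat, (∀ i j : Nat, i ≤ j → j < m → q j = true → q i = true) →
      (List.range m).filter q = List.range ((List.range m).countP q) := by
  intro m
  induction m with
  | zero => intro _; simp
  | succ m ih =>
    intro h
    rw [List.range_succ, List.filter_append, List.countP_append]
    by_cases hq : q m = true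
    · have hall : ∀ a ∈ List.range m, q a = true := by
        intro a ha
        rw [List.mem_range] at ha
        exact h a m (by omega) (by omega) hq
      rw [List.filter_eq_self.mpr hall, List.countP_eq_length.mpr hall]
      simp [hq, List.range_succ]
    · have hq' : q m = false := by simpa using hq
      simp only [List.filter_cons, List.filter_nil, hq', List.countP_cons]
      rw [ih (fun i j hij hjm => h i j hij (by omega))]
      simp

-- ---- the B line, concretely ----

lemma pvLineB_colors (board : List (List Int)) (n x y dx dy : Int) (hn : 0 ≤ n)
    (hdc : ∀ i j : Nat, i ≤ j → j < n.toNat →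
        (0 ≤ x + dx * j ∧ x + dx * j < n ∧ 0 ≤ y + dy * j ∧ y + dy * j < n) →
        (0 ≤ x + dx * i ∧ x + dx * i < n ∧ 0 ≤ y + dy * i ∧ y + dy * i < n)) :
    ∃ K : Nat, K ≤ n.toNat ∧
      (∀ i : Nat, i < n.toNat →
        ((0 ≤ x + dx * i ∧ x + dx * i < n ∧ 0 ≤ y + dy * i ∧ y + dy * i < n) ↔ i < K)) ∧
      pvColors board (pvLineB n x y dx dy) =
        List.map (fun i : Nat => pvCell board (y + dy * i) (x + dx * i)) (List.range K) := by
  set q : Nat → Bool := fun i =>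
    decide (0 ≤ x + dx * (i : Int) ∧ x + dx * i < n ∧ 0 ≤ y + dy * i ∧ y + dy * i < n) with hq
  have hdcq : ∀ i j : Nat, i ≤ j → j < n.toNat → q j = true → q i = true := by
    intro i j hij hjm hqj
    rw [hq]
    simp only [decide_eq_true_eq]
    exact hdc i j hij hjm (by simpa [hq] using hqj)
  set K := (List.range n.toNat).countP q with hK
  have hrange : PySem.List.pyRange 0 n = (List.range n.toNat).map (fun k : Nat => (k : Int)) := by
    conv_lhs => rw [show n = ((n.toNat : Nat) : Int) from by omega]
    exact PySem.List.pyRange_zero_natCast n.toNat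
  have hfilter : (PySem.List.pyRange 0 n).filter (fun i =>
      decide (0 ≤ x + dx * i ∧ x + dx * i < n ∧ 0 ≤ y + dy * i ∧ y + dy * i < n)) =
      (List.range K).map (fun k : Nat => (k : Int)) := by
    rw [hrange, List.filter_map]
    rw [show ((fun i : Int => decide (0 ≤ x + dx * i ∧ x + dx * i < n ∧ 0 ≤ y + dy * i ∧
        y + dy * i < n)) ∘ (fun k : Nat => (k : Int))) = q from rfl]
    rw [pvFilterRange q n.toNat hdcq]
  refine ⟨K, ?_, ?_, ?_⟩
  · rw [hK]
    calc (List.range n.toNat).countP q ≤ (List.range n.toNat).length := List.countP_le_length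
      _ = n.toNat := List.length_range
  · intro i him
    constructor
    · intro hb
      have hiK : (i : Int) ∈ (List.range K).map (fun k : Nat => (k : Int)) := by
        rw [← hfilter, List.mem_filter]
        constructor
        · rw [hrange]
          simp only [List.mem_map, List.mem_range]
          exact ⟨i, him, rfl⟩
        · simpa using hb
      simp only [List.mem_map, List.mem_range] at hiK
      obtain ⟨a, ha, hai⟩ := hiK
      omega
    · intro hiK
      have : (i : Int) ∈ (List.range K).map (fun k : Nat => (k : Int)) := by
        simp only [List.mem_map, List.mem_range]
        exact ⟨i, hiK, rfl⟩
      rw [← hfilter, List.mem_filter] at this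
      simpa using this.2
  · unfold pvColors pvLineB
    rw [hfilter, List.map_map, List.map_map]
    rfl

-- ---- bridge: windows in a B line = board windows ----

lemma pvBridgeFwd (board : List (List Int)) (n x y dx dy : Int)
    (hx : 0 ≤ x ∧ x < n) (_hy : 0 ≤ y ∧ y < n)
    (hdc : ∀ i j : Nat, i ≤ j → j < n.toNat →
        (0 ≤ x + dx * j ∧ x + dx * j < n ∧ 0 ≤ y + dy * j ∧ y + dy * j < n) →
        (0 ≤ x + dx * i ∧ x + dx * i < n ∧ 0 ≤ y + dy * i ∧ y + dy * i < n))
    (hG : pvG 0 0 (pvColors board (pvLineB n x y dx dy)) = true) :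
    ∃ x' y', pvWin board n dx dy x' y' := by
  have hn : 0 ≤ n := by omega
  obtain ⟨K, hK, hiff, hcol⟩ := pvLineB_colors board n x y dx dy hn hdc
  rw [hcol, pvG_iff _ 0 0 le_rfl] at hG
  simp only [Int.toNat_zero, List.replicate_zero, List.nil_append] at hG
  rw [pvQ_map_range] at hG
  obtain ⟨j, hj5, hcj, hall⟩ := hG
  refine ⟨x + dx * j, y + dy * j, hcj, ?_⟩
  intro i h0 h4
  obtain ⟨iN, rfl⟩ : ∃ iN : Nat, i = (iN : Int) := ⟨i.toNat, by omega⟩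
  have hb := (hiff (j + iN) (by omega)).mpr (by omega)
  have hc := hall iN (by omega)
  simp only [] at hb hc
  push_cast at hb hc
  have e1 : x + dx * ((j : Int) + (iN : Int)) = x + dx * (j : Int) + dx * (iN : Int) := by ring
  have e2 : y + dy * ((j : Int) + (iN : Int)) = y + dy * (j : Int) + dy * (iN : Int) := by ring
  rw [e1, e2] at hb hc
  exact ⟨hb.1, hb.2.1, hb.2.2.1, hb.2.2.2, hc⟩

lemma pvBridgeBack (board : List (List Int)) (n dx dy x' y' : Int) (t : Nat)
    (hstep : dx = 1 ∨ dy = 1)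
    (hwin : pvWin board n dx dy x' y')
    (hback : ∀ i : Nat, i ≤ t →
      0 ≤ x' - dx * t + dx * i ∧ x' - dx * t + dx * i < n ∧
      0 ≤ y' - dy * t + dy * i ∧ y' - dy * t + dy * i < n)
    (hpred : ¬(0 ≤ x' - dx * t - dx ∧ x' - dx * t - dx < n ∧
      0 ≤ y' - dy * t - dy ∧ y' - dy * t - dy < n))
    (hdc : ∀ i j : Nat, i ≤ j → j < n.toNat →
        (0 ≤ x' - dx * t + dx * j ∧ x' - dx * t + dx * j < n ∧
         0 ≤ y' - dy * t + dy * j ∧ y' - dy * t + dy * j < n) →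
        (0 ≤ x' - dx * t + dx * i ∧ x' - dx * t + dx * i < n ∧
         0 ≤ y' - dy * t + dy * i ∧ y' - dy * t + dy * i < n)) :
    ∃ y0 ∈ PySem.List.pyRange 0 n, ∃ x0 ∈ PySem.List.pyRange 0 n,
      pvHitB board n dx dy y0 x0 = true := by
  obtain ⟨hcol12, hall⟩ := hwin
  have h0 := hback 0 (by omega)
  simp only [Nat.cast_zero, mul_zero, add_zero] at h0
  have hn : 0 ≤ n := le_of_lt (lt_of_le_of_lt h0.1 h0.2.1)
  obtain ⟨K, hK, hiff, hcol⟩ :=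
    pvLineB_colors board n (x' - dx * t) (y' - dy * t) dx dy hn hdc
  refine ⟨y' - dy * t, by rw [PySem.List.mem_pyRange_one]; exact ⟨h0.2.2.1, h0.2.2.2⟩,
    x' - dx * t, by rw [PySem.List.mem_pyRange_one]; exact ⟨h0.1, h0.2.1⟩, ?_⟩
  unfold pvHitB
  rw [if_neg hpred, hcol, pvG_iff _ 0 0 le_rfl]
  simp only [Int.toNat_zero, List.replicate_zero, List.nil_append]
  rw [pvQ_map_range]
  have hw4 := hall 4 (by norm_num) (by norm_num)
  have ht4n : (t : Int) + 4 < n := by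
    rcases hstep with rfl | rfl
    · have a1 := hw4.2.1
      have a2 := h0.1
      simp only [one_mul] at a1 a2
      omega
    · have a1 := hw4.2.2.2.1
      have a2 := h0.2.2.1
      simp only [one_mul] at a1 a2
      omega
  have hidx : ∀ i : Nat, i ≤ t + 4 →
      0 ≤ x' - dx * t + dx * i ∧ x' - dx * t + dx * i < n ∧
      0 ≤ y' - dy * t + dy * i ∧ y' - dy * t + dy * i < n := by
    intro i hi
    rcases le_or_gt i t with hit | hit
    · exact hback i hit
    · have hw := hall ((i : Int) - t) (by omega) (by omega)
      have e1 : x' + dx * ((i : Int) - t) = x' - dx * t + dx * i := by ring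
      have e2 : y' + dy * ((i : Int) - t) = y' - dy * t + dy * i := by ring
      rw [e1, e2] at hw
      exact ⟨hw.1, hw.2.1, hw.2.2.1, hw.2.2.2.1⟩
  have htK : t + 5 ≤ K := by
    have h1 := (hiff (t + 4) (by omega)).mp (by
      have := hidx (t + 4) le_rfl
      push_cast at this ⊢
      exact this)
    omega
  refine ⟨t, htK, ?_, ?_⟩
  · rw [show y' - dy * (t : Int) + dy * (t : Nat) = y' from by ring,
      show x' - dx * (t : Int) + dx * (t : Nat) = x' from by ring]
    exact hcol12
  · intro i hi
    have hw := (hall i (by omega) (by omega)).2.2.2.2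
    rw [show y' - dy * (t : Int) + dy * ((t + i : Nat) : Int) = y' + dy * i from by push_cast; ring,
      show x' - dx * (t : Int) + dx * ((t + i : Nat) : Int) = x' + dx * i from by push_cast; ring,
      show y' - dy * (t : Int) + dy * ((t : Nat) : Int) = y' from by ring,
      show x' - dx * (t : Int) + dx * ((t : Nat) : Int) = x' from by ring]
    exact hw

lemma pvB_iff_P (board : List (List Int)) (n : Int) :
    clear_matching_lines_alt board n = true ↔ pvP board n := by
  rw [pvB_iff]
  unfold pvP
  constructor
  · rintro ⟨⟨dx, dy⟩, hd, y, hy, x, hx, hhit⟩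
    rw [PySem.List.mem_pyRange_one] at hy hx
    refine ⟨(dx, dy), hd, ?_⟩
    dsimp only at hhit ⊢
    unfold pvHitB at hhit
    split_ifs at hhit with hpred
    have hd' : dx = 1 ∧ dy = 0 ∨ dx = 0 ∧ dy = 1 ∨ dx = 1 ∧ dy = 1 ∨ dx = 1 ∧ dy = -1 := by
      simpa [pvDirsA, Prod.ext_iff] using hd
    rcases hd' with ⟨rfl, rfl⟩ | ⟨rfl, rfl⟩ | ⟨rfl, rfl⟩ | ⟨rfl, rfl⟩ <;>
      exact pvBridgeFwd board n x y _ _ ⟨hx.1, hx.2⟩ ⟨hy.1, hy.2⟩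
        (by intro i j hij hjm hb; omega) hhit
  · rintro ⟨⟨dx, dy⟩, hd, x', y', hwin⟩
    refine ⟨(dx, dy), hd, ?_⟩
    dsimp only at hwin ⊢
    have h00 := hwin.2 0 (by norm_num) (by norm_num)
    simp only [mul_zero, add_zero] at h00
    have hd' : dx = 1 ∧ dy = 0 ∨ dx = 0 ∧ dy = 1 ∨ dx = 1 ∧ dy = 1 ∨ dx = 1 ∧ dy = -1 := by
      simpa [pvDirsA, Prod.ext_iff] using hd
    rcases hd' with ⟨rfl, rfl⟩ | ⟨rfl, rfl⟩ | ⟨rfl, rfl⟩ | ⟨rfl, rfl⟩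
    · exact pvBridgeBack board n 1 0 x' y' x'.toNat (Or.inl rfl) hwin
        (by intro i hi; omega) (by omega) (by intro i j hij hjm hb; omega)
    · exact pvBridgeBack board n 0 1 x' y' y'.toNat (Or.inr rfl) hwin
        (by intro i hi; omega) (by omega) (by intro i j hij hjm hb; omega)
    · exact pvBridgeBack board n 1 1 x' y' (min x'.toNat y'.toNat) (Or.inl rfl) hwin
        (by intro i hi; omega) (by omega) (by intro i j hij hjm hb; omega)
    · exact pvBridgeBack board n 1 (-1) x' y' (min x'.toNat (n - 1 - y').toNat) (Or.inl rfl) hwin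
        (by intro i hi; omega) (by omega) (by intro i j hij hjm hb; omega)

-- ===== VERDICT (by name: the statement is the Claim_ definition above) =====
theorem clear_matching_lines_spec : Claim_equal_clear_matching_lines := by
  intro board board_size _hdom _hpre
  unfold Spec_clear_matching_lines
  rw [← Bool.coe_iff_coe, pvA_iff_P, pvB_iff_P]
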